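-- pv_equiv track=rewrite | github.com/mleitnercom/ews-mcp | src/openapi_adapter.py | _get_tool_category
-- ===== SOURCE A (Python) =====
-- def _get_tool_category(tool_name: str) -> str:
--     """Determine tool category from tool name.
--
--     Args:
--         tool_name: Name of the tool
--
--     Returns:
--         Category name for grouping in OpenAPI docs
--     """
--     # Email tools
--     if any(x in tool_name for x in ["email", "send", "read", "search_emails", "move_email", "delete_email", "update_email", "copy_email", "get_email_details"]):
--         return "Email"
--     # Calendar tools
--     elif any(x in tool_name for x in ["appointment", "calendar", "meeting", "availability", "respond_to_meeting", "find_meeting_times"]):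
--         return "Calendar"
--     # Contact tools
--     elif any(x in tool_name for x in ["contact", "person", "resolve_names", "search_contacts", "get_contacts"]):
--         return "Contacts"
--     # Task tools
--     elif any(x in tool_name for x in ["task", "complete"]):
--         return "Tasks"
--     # Attachment tools
--     elif any(x in tool_name for x in ["attachment", "download", "upload", "read_attachment"]):
--         return "Attachments"
--     # Search tools
--     elif any(x in tool_name for x in ["advanced_search", "conversation", "full_text"]):
--         return "Search"
--     # Folder tools
--     elif any(x in tool_name for x in ["folder", "rename", "move_folder", "list_folders"]):
--         return "Folders"
--     # Out-of-Office tools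
--     elif any(x in tool_name for x in ["oof", "out_of_office"]):
--         return "Out-of-Office"
--     return "Other"
-- ===== SOURCE B (Python) =====
-- # B: instead of running a substring search for every keyword, enumerate the
-- # substrings of tool_name (lengths 1..18, the longest keyword) once and look
-- # each up in a precomputed keyword -> priority hash map, keeping the smallest
-- # priority seen; the answer is the category of that priority.
-- _CATEGORIES = ["Email", "Calendar", "Contacts", "Tasks", "Attachments",
--                "Search", "Folders", "Out-of-Office"]
--
-- _KEYWORD_PRIORITY = {
--     "email": 0, "send": 0, "read": 0, "search_emails": 0, "move_email": 0,
--     "delete_email": 0, "update_email": 0, "copy_email": 0, "get_email_details": 0,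
--     "appointment": 1, "calendar": 1, "meeting": 1, "availability": 1,
--     "respond_to_meeting": 1, "find_meeting_times": 1,
--     "contact": 2, "person": 2, "resolve_names": 2, "search_contacts": 2, "get_contacts": 2,
--     "task": 3, "complete": 3,
--     "attachment": 4, "download": 4, "upload": 4, "read_attachment": 4,
--     "advanced_search": 5, "conversation": 5, "full_text": 5,
--     "folder": 6, "rename": 6, "move_folder": 6, "list_folders": 6,
--     "oof": 7, "out_of_office": 7,
-- }
--
-- _MAX_KEYWORD_LEN = 18  # len("respond_to_meeting")
--
--
-- def _get_tool_category(tool_name: str) -> str: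
--     n = len(tool_name)
--     best = 8
--     for i in range(n):
--         for l in range(1, min(_MAX_KEYWORD_LEN, n - i) + 1):
--             p = _KEYWORD_PRIORITY.get(tool_name[i:i + l])
--             if p is not None and p < best:
--                 best = p
--     if best < 8:
--         return _CATEGORIES[best]
--     return "Other"
-- ===== Notes on version B (the rewrite author's own statement) =====
-- stated objective: alternative
-- what changed: B inverts the search direction: instead of running a substring scan over tool_name for each of the 35 keywords (A's if/elif chain), it enumerates the substrings of tool_name of length 1..18 once and looks each up in a precomputed keyword-to-priority hash map, returning the category of the minimum priority found (8 = Other).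
import Mathlib
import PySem

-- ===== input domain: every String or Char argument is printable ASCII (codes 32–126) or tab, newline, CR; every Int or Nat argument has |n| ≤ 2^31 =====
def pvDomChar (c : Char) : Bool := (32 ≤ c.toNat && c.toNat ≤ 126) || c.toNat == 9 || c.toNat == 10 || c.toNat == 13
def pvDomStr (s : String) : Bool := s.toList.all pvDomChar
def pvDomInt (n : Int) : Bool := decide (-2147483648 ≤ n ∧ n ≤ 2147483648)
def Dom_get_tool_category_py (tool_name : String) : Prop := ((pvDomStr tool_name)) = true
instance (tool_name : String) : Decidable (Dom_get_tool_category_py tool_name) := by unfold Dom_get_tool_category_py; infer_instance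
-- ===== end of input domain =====

-- B inverts the search: instead of a substring scan per keyword (A), it enumerates the
-- substrings of tool_name (lengths 1..18) once, looks each up in a keyword -> priority
-- hash map, and returns the category of the smallest priority found (alternative).
-- ===== PORT A =====
def get_tool_category_py (tool_name : String) : String :=
  if ["email", "send", "read", "search_emails", "move_email", "delete_email", "update_email", "copy_email", "get_email_details"].any (fun x => PySem.Str.isIn x tool_name) then "Email"
  else if ["appointment", "calendar", "meeting", "availability", "respond_to_meeting", "find_meeting_times"].any (fun x => PySem.Str.isIn x tool_name) then "Calendar"
  else if ["contact", "person", "resolve_names", "search_contacts", "get_contacts"].any (fun x => PySem.Str.isIn x tool_name) then "Contacts"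
  else if ["task", "complete"].any (fun x => PySem.Str.isIn x tool_name) then "Tasks"
  else if ["attachment", "download", "upload", "read_attachment"].any (fun x => PySem.Str.isIn x tool_name) then "Attachments"
  else if ["advanced_search", "conversation", "full_text"].any (fun x => PySem.Str.isIn x tool_name) then "Search"
  else if ["folder", "rename", "move_folder", "list_folders"].any (fun x => PySem.Str.isIn x tool_name) then "Folders"
  else if ["oof", "out_of_office"].any (fun x => PySem.Str.isIn x tool_name) then "Out-of-Office"
  else "Other"

-- ===== PORT B =====
def pvCategories : List String :=
  ["Email", "Calendar", "Contacts", "Tasks", "Attachments", "Search", "Folders", "Out-of-Office"]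

-- _KEYWORD_PRIORITY of Source B (a literal dict; keys are distinct)
def pvKeywordPriority : PySem.Dict String Int := PySem.Dict.mk
  [("email", 0), ("send", 0), ("read", 0), ("search_emails", 0), ("move_email", 0),
   ("delete_email", 0), ("update_email", 0), ("copy_email", 0), ("get_email_details", 0),
   ("appointment", 1), ("calendar", 1), ("meeting", 1), ("availability", 1),
   ("respond_to_meeting", 1), ("find_meeting_times", 1),
   ("contact", 2), ("person", 2), ("resolve_names", 2), ("search_contacts", 2), ("get_contacts", 2),
   ("task", 3), ("complete", 3),
   ("attachment", 4), ("download", 4), ("upload", 4), ("read_attachment", 4),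
   ("advanced_search", 5), ("conversation", 5), ("full_text", 5),
   ("folder", 6), ("rename", 6), ("move_folder", 6), ("list_folders", 6),
   ("oof", 7), ("out_of_office", 7)]

-- inner loop of Source B: for l in range(1, min(18, n-i)+1): p = dict.get(slice); if p is not None and p < best
def pvInner (tool_name : String) (n i : Int) (b : Int) : Int :=
  (PySem.List.pyRange 1 (min 18 (n - i) + 1)).foldl
    (fun b l =>
      match pvKeywordPriority.get? (PySem.Str.slice tool_name (some i) (some (i + l))) with
      | some p => if p < b then p else b
      | none => b) b

-- outer loop of Source B: best over all start positions i in range(n)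
def pvBest (tool_name : String) : Int :=
  let n : Int := PySem.Str.len tool_name
  (PySem.List.pyRange 0 n).foldl (fun b i => pvInner tool_name n i b) 8

def get_tool_category_py_alt (tool_name : String) : String :=
  let best := pvBest tool_name
  if best < 8 then (PySem.List.pyGet? pvCategories best).getD "Other" else "Other"
  -- the index is always in range (0 ≤ best < 8 when the branch is taken); getD only totalizes

-- ===== PRECONDITION & SPEC =====
def Spec_get_tool_category_py (tool_name : String) (out : String) : Prop := out = get_tool_category_py_alt tool_name
instance (tool_name : String) (out : String) : Decidable (Spec_get_tool_category_py tool_name out) := by unfold Spec_get_tool_category_py; infer_instance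

-- ===== CLAIM (what is proved, stated in full; the proofs are below) =====
def Claim_equal_get_tool_category_py : Prop := ∀ (tool_name : String), Dom_get_tool_category_py tool_name → Spec_get_tool_category_py tool_name (get_tool_category_py tool_name)

-- ===== LEMMAS AND PROOFS =====

-- "some keyword of priority p occurs in s"
def pvOk (s : String) (p : Int) : Prop :=
  ∃ kv ∈ pvKeywordPriority.items, PySem.Str.isIn kv.1 s = true ∧ kv.2 = p

-- "some substring enumerated by B's loops looks up to priority p"
def pvOk' (s : String) (p : Int) : Prop :=
  ∃ i ∈ PySem.List.pyRange 0 (PySem.Str.len s),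
    ∃ l ∈ PySem.List.pyRange 1 (min 18 (PySem.Str.len s - i) + 1),
      pvKeywordPriority.get? (PySem.Str.slice s (some i) (some (i + l))) = some p

-- generic min-accumulating fold facts
lemma pvGfold_le {α : Type} (step : Int → α → Int) (H1 : ∀ b x, step b x ≤ b) :
    ∀ (xs : List α) (b : Int), xs.foldl step b ≤ b := by
  intro xs
  induction xs with
  | nil => intro b; simp
  | cons x xs ih => intro b; simpa using le_trans (ih (step b x)) (H1 b x)

lemma pvGfold_mem {α : Type} (step : Int → α → Int) (Q : α → Int → Prop)
    (H2 : ∀ b x, step b x = b ∨ Q x (step b x)) :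
    ∀ (xs : List α) (b : Int), xs.foldl step b = b ∨ ∃ x ∈ xs, Q x (xs.foldl step b) := by
  intro xs
  induction xs with
  | nil => intro b; left; rfl
  | cons x xs ih =>
    intro b
    simp only [List.foldl_cons]
    rcases ih (step b x) with h | ⟨y, hy, hQ⟩
    · rcases H2 b x with h' | h'
      · left; rw [h, h']
      · right
        refine ⟨x, List.mem_cons_self, ?_⟩
        rw [h]
        exact h'
    · right; exact ⟨y, List.mem_cons_of_mem _ hy, hQ⟩

lemma pvGfold_lb {α : Type} (step : Int → α → Int) (Q : α → Int → Prop)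
    (H1 : ∀ b x, step b x ≤ b) (H3 : ∀ b x p, Q x p → step b x ≤ p) :
    ∀ (xs : List α) (b : Int) (x : α), x ∈ xs → ∀ p, Q x p → xs.foldl step b ≤ p := by
  intro xs
  induction xs with
  | nil => intro b x hx; cases hx
  | cons y ys ih =>
    intro b x hx p hQ
    simp only [List.foldl_cons]
    rcases List.mem_cons.mp hx with rfl | hx'
    · exact le_trans (pvGfold_le step H1 ys (step b x)) (H3 b x p hQ)
    · exact ih (step b y) x hx' p hQ

-- inner-loop step facts
lemma pvIstep_le (s : String) (i : Int) : ∀ (b l : Int),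
    (match pvKeywordPriority.get? (PySem.Str.slice s (some i) (some (i + l))) with
     | some p => if p < b then p else b
     | none => b) ≤ b := by
  intro b l
  cases h : pvKeywordPriority.get? (PySem.Str.slice s (some i) (some (i + l))) with
  | none => simp
  | some p => simp only; split <;> omega

lemma pvInner_le (s : String) (n i b : Int) : pvInner s n i b ≤ b :=
  pvGfold_le _ (pvIstep_le s i) _ b

lemma pvInner_mem (s : String) (n i b : Int) :
    pvInner s n i b = b ∨
      ∃ l ∈ PySem.List.pyRange 1 (min 18 (n - i) + 1),
        pvKeywordPriority.get? (PySem.Str.slice s (some i) (some (i + l))) = some (pvInner s n i b) := by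
  refine pvGfold_mem _ (fun l r => pvKeywordPriority.get? (PySem.Str.slice s (some i) (some (i + l))) = some r) ?_ _ b
  intro b l
  cases h : pvKeywordPriority.get? (PySem.Str.slice s (some i) (some (i + l))) with
  | none => left; rfl
  | some p =>
    simp only
    split
    · right; exact h
    · left; rfl

lemma pvInner_lb (s : String) (n i b l : Int)
    (hl : l ∈ PySem.List.pyRange 1 (min 18 (n - i) + 1)) (p : Int)
    (h : pvKeywordPriority.get? (PySem.Str.slice s (some i) (some (i + l))) = some p) :
    pvInner s n i b ≤ p := by
  refine pvGfold_lb _ (fun l r => pvKeywordPriority.get? (PySem.Str.slice s (some i) (some (i + l))) = some r)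
    (pvIstep_le s i) ?_ _ b l hl p h
  intro b x q hq
  simp only [hq]
  split <;> omega

-- pvBest facts
lemma pvBest_cases (s : String) : pvBest s = 8 ∨ pvOk' s (pvBest s) := by
  unfold pvBest pvOk'
  exact pvGfold_mem _
    (fun i r => ∃ l ∈ PySem.List.pyRange 1 (min 18 (PySem.Str.len s - i) + 1),
        pvKeywordPriority.get? (PySem.Str.slice s (some i) (some (i + l))) = some r)
    (fun b i => pvInner_mem s (PySem.Str.len s) i b) _ 8

lemma pvBest_lb (s : String) (p : Int) (h : pvOk' s p) : pvBest s ≤ p := by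
  obtain ⟨i, hi, l, hl, hget⟩ := h
  unfold pvBest
  exact pvGfold_lb _
    (fun i r => ∃ l ∈ PySem.List.pyRange 1 (min 18 (PySem.Str.len s - i) + 1),
        pvKeywordPriority.get? (PySem.Str.slice s (some i) (some (i + l))) = some r)
    (fun b i => pvInner_le s (PySem.Str.len s) i b)
    (fun b i q ⟨l', hl', hg'⟩ => pvInner_lb s (PySem.Str.len s) i b l' hl' q hg')
    _ 8 i hi p ⟨l, hl, hget⟩

-- literal-dict facts (checked by the kernel)
lemma pvNodup : pvKeywordPriority.keys.Nodup := by decide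

lemma pvKwLen : ∀ kv ∈ pvKeywordPriority.items, 1 ≤ kv.1.toList.length ∧ kv.1.toList.length ≤ 18 := by decide

lemma pvPrioRange : ∀ kv ∈ pvKeywordPriority.items, 0 ≤ kv.2 ∧ kv.2 ≤ 7 := by decide

-- bridge: a looked-up substring is a matched keyword
lemma pvOk_of_Ok' (s : String) (p : Int) (h : pvOk' s p) : pvOk s p := by
  obtain ⟨i, hi, l, hl, hget⟩ := h
  obtain ⟨hi0, _⟩ := PySem.List.mem_pyRange_one.mp hi
  obtain ⟨hl1, _⟩ := PySem.List.mem_pyRange_one.mp hl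
  refine ⟨(PySem.Str.slice s (some i) (some (i + l)), p),
    PySem.Dict.mem_items_of_get?_eq_some _ hget, ?_, rfl⟩
  rw [PySem.Str.isIn_iff_infix, PySem.Str.toList_slice, PySem.Chars.slice_eq_listSlice,
    PySem.List.slice_toNat s.toList hi0 (by omega)]
  exact ((List.take_prefix _ _).isInfix).trans ((List.drop_suffix _ _).isInfix)

-- bridge: a matched keyword is found by the substring enumeration
lemma pvOk'_of_Ok (s : String) (p : Int) (h : pvOk s p) : pvOk' s p := by
  obtain ⟨⟨k, q⟩, hmem, hin, hq⟩ := h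
  subst hq
  obtain ⟨hk1', hk18'⟩ := pvKwLen _ hmem
  have hk1 : 1 ≤ k.toList.length := hk1'
  have hk18 : k.toList.length ≤ 18 := hk18'
  rw [PySem.Str.isIn_eq, ← PySem.Chars.exists_prefix_drop_iff_isIn] at hin
  obtain ⟨j, hpre⟩ := hin
  have hlen : k.toList.length ≤ s.toList.length - j := by
    have := hpre.length_le
    simp only [List.length_drop] at this
    omega
  have hjlt : j < s.toList.length := by
    by_contra hc
    rw [List.drop_eq_nil_of_le (by omega)] at hpre
    have := hpre.length_le
    simp at this
    omega
  refine ⟨(j : Int), ?_, (k.toList.length : Int), ?_, ?_⟩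
  · rw [PySem.List.mem_pyRange_one, PySem.Str.len_eq]
    constructor <;> omega
  · rw [PySem.List.mem_pyRange_one, PySem.Str.len_eq]
    constructor
    · omega
    · have : (j : Int) ≤ (s.toList.length : Int) := by omega
      omega
  · have hslice : PySem.Str.slice s (some (j : Int)) (some ((j : Int) + (k.toList.length : Int))) = k := by
      apply String.ext
      rw [PySem.Str.toList_slice, PySem.Chars.slice_eq_listSlice, PySem.List.slice_natCast_add]
      exact (List.prefix_iff_eq_take.mp hpre).symm
    rw [hslice]
    exact PySem.Dict.get?_of_mem_items _ hmem pvNodup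

lemma pvOk_bounds (s : String) (p : Int) (h : pvOk s p) : 0 ≤ p ∧ p ≤ 7 := by
  obtain ⟨kv, hmem, _, hq⟩ := h
  exact hq ▸ pvPrioRange kv hmem

-- pvOk at a concrete priority ↔ A's per-category any(...)
lemma pvOk_of_any (s : String) (c : Int) (keys : List String)
    (hmem : ∀ x ∈ keys, ((x : String), c) ∈ pvKeywordPriority.items)
    (h : keys.any (fun x => PySem.Str.isIn x s) = true) : pvOk s c := by
  obtain ⟨x, hx, hin⟩ := List.any_eq_true.mp h
  exact ⟨(x, c), hmem x hx, hin, rfl⟩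

lemma pvAny_of_Ok (s : String) (c : Int) (keys : List String)
    (hrev : ∀ kv ∈ pvKeywordPriority.items, kv.2 = c → kv.1 ∈ keys)
    (h : pvOk s c) : keys.any (fun x => PySem.Str.isIn x s) = true := by
  obtain ⟨kv, hmem, hin, hq⟩ := h
  exact List.any_eq_true.mpr ⟨kv.1, hrev kv hmem hq, hin⟩

-- the value of pvBest determined by which categories match
lemma pvBest_eq (s : String) (c : Int) (hc : 0 ≤ c ∧ c ≤ 7) (hok : pvOk s c)
    (hnot : ∀ d, 0 ≤ d → d < c → ¬ pvOk s d) : pvBest s = c := by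
  have h1 : pvBest s ≤ c := pvBest_lb s c (pvOk'_of_Ok s c hok)
  rcases pvBest_cases s with h8 | hok'
  · omega
  · have hb := pvOk_of_Ok' s _ hok'
    have hbb := pvOk_bounds s _ hb
    by_contra hne
    exact hnot (pvBest s) (by omega) (by omega) hb

lemma pvBest_none (s : String) (hnot : ∀ d, ¬ pvOk s d) : pvBest s = 8 := by
  rcases pvBest_cases s with h8 | hok'
  · exact h8
  · exact absurd (pvOk_of_Ok' s _ hok') (hnot _)

-- per-category membership facts (kernel-checked on the literal dict)
lemma pvC0 : ∀ x ∈ ["email", "send", "read", "search_emails", "move_email", "delete_email", "update_email", "copy_email", "get_email_details"], ((x : String), (0 : Int)) ∈ pvKeywordPriority.items := by decide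
lemma pvR0 : ∀ kv ∈ pvKeywordPriority.items, kv.2 = (0 : Int) → kv.1 ∈ ["email", "send", "read", "search_emails", "move_email", "delete_email", "update_email", "copy_email", "get_email_details"] := by decide
lemma pvC1 : ∀ x ∈ ["appointment", "calendar", "meeting", "availability", "respond_to_meeting", "find_meeting_times"], ((x : String), (1 : Int)) ∈ pvKeywordPriority.items := by decide
lemma pvR1 : ∀ kv ∈ pvKeywordPriority.items, kv.2 = (1 : Int) → kv.1 ∈ ["appointment", "calendar", "meeting", "availability", "respond_to_meeting", "find_meeting_times"] := by decide
lemma pvC2 : ∀ x ∈ ["contact", "person", "resolve_names", "search_contacts", "get_contacts"], ((x : String), (2 : Int)) ∈ pvKeywordPriority.items := by decide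
lemma pvR2 : ∀ kv ∈ pvKeywordPriority.items, kv.2 = (2 : Int) → kv.1 ∈ ["contact", "person", "resolve_names", "search_contacts", "get_contacts"] := by decide
lemma pvC3 : ∀ x ∈ ["task", "complete"], ((x : String), (3 : Int)) ∈ pvKeywordPriority.items := by decide
lemma pvR3 : ∀ kv ∈ pvKeywordPriority.items, kv.2 = (3 : Int) → kv.1 ∈ ["task", "complete"] := by decide
lemma pvC4 : ∀ x ∈ ["attachment", "download", "upload", "read_attachment"], ((x : String), (4 : Int)) ∈ pvKeywordPriority.items := by decide
lemma pvR4 : ∀ kv ∈ pvKeywordPriority.items, kv.2 = (4 : Int) → kv.1 ∈ ["attachment", "download", "upload", "read_attachment"] := by decide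
lemma pvC5 : ∀ x ∈ ["advanced_search", "conversation", "full_text"], ((x : String), (5 : Int)) ∈ pvKeywordPriority.items := by decide
lemma pvR5 : ∀ kv ∈ pvKeywordPriority.items, kv.2 = (5 : Int) → kv.1 ∈ ["advanced_search", "conversation", "full_text"] := by decide
lemma pvC6 : ∀ x ∈ ["folder", "rename", "move_folder", "list_folders"], ((x : String), (6 : Int)) ∈ pvKeywordPriority.items := by decide
lemma pvR6 : ∀ kv ∈ pvKeywordPriority.items, kv.2 = (6 : Int) → kv.1 ∈ ["folder", "rename", "move_folder", "list_folders"] := by decide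
lemma pvC7 : ∀ x ∈ ["oof", "out_of_office"], ((x : String), (7 : Int)) ∈ pvKeywordPriority.items := by decide
lemma pvR7 : ∀ kv ∈ pvKeywordPriority.items, kv.2 = (7 : Int) → kv.1 ∈ ["oof", "out_of_office"] := by decide

lemma pvAlt_at (s : String) (c : Int) (hb : pvBest s = c) :
    get_tool_category_py_alt s =
      (if c < 8 then (PySem.List.pyGet? pvCategories c).getD "Other" else "Other") := by
  unfold get_tool_category_py_alt
  rw [hb]

-- ===== VERDICT (by name: the statement is the Claim_ definition above) =====
theorem get_tool_category_py_spec : Claim_equal_get_tool_category_py := by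
  intro s _
  unfold Spec_get_tool_category_py
  unfold get_tool_category_py
  by_cases h0 : (["email", "send", "read", "search_emails", "move_email", "delete_email", "update_email", "copy_email", "get_email_details"].any (fun x => PySem.Str.isIn x s)) = true
  · rw [if_pos h0, pvAlt_at s 0 (pvBest_eq s 0 (by omega) (pvOk_of_any s 0 _ pvC0 h0) (by intro d h1 h2 _; omega))]
    decide
  · rw [if_neg h0]
    by_cases h1 : (["appointment", "calendar", "meeting", "availability", "respond_to_meeting", "find_meeting_times"].any (fun x => PySem.Str.isIn x s)) = true
    · rw [if_pos h1, pvAlt_at s 1 (pvBest_eq s 1 (by omega) (pvOk_of_any s 1 _ pvC1 h1) ?_)]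
      · decide
      · intro d hd0 hdc hok
        interval_cases d
        · exact h0 (pvAny_of_Ok s 0 _ pvR0 hok)
    · rw [if_neg h1]
      by_cases h2 : (["contact", "person", "resolve_names", "search_contacts", "get_contacts"].any (fun x => PySem.Str.isIn x s)) = true
      · rw [if_pos h2, pvAlt_at s 2 (pvBest_eq s 2 (by omega) (pvOk_of_any s 2 _ pvC2 h2) ?_)]
        · decide
        · intro d hd0 hdc hok
          interval_cases d
          · exact h0 (pvAny_of_Ok s 0 _ pvR0 hok)
          · exact h1 (pvAny_of_Ok s 1 _ pvR1 hok)
      · rw [if_neg h2]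
        by_cases h3 : (["task", "complete"].any (fun x => PySem.Str.isIn x s)) = true
        · rw [if_pos h3, pvAlt_at s 3 (pvBest_eq s 3 (by omega) (pvOk_of_any s 3 _ pvC3 h3) ?_)]
          · decide
          · intro d hd0 hdc hok
            interval_cases d
            · exact h0 (pvAny_of_Ok s 0 _ pvR0 hok)
            · exact h1 (pvAny_of_Ok s 1 _ pvR1 hok)
            · exact h2 (pvAny_of_Ok s 2 _ pvR2 hok)
        · rw [if_neg h3]
          by_cases h4 : (["attachment", "download", "upload", "read_attachment"].any (fun x => PySem.Str.isIn x s)) = true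
          · rw [if_pos h4, pvAlt_at s 4 (pvBest_eq s 4 (by omega) (pvOk_of_any s 4 _ pvC4 h4) ?_)]
            · decide
            · intro d hd0 hdc hok
              interval_cases d
              · exact h0 (pvAny_of_Ok s 0 _ pvR0 hok)
              · exact h1 (pvAny_of_Ok s 1 _ pvR1 hok)
              · exact h2 (pvAny_of_Ok s 2 _ pvR2 hok)
              · exact h3 (pvAny_of_Ok s 3 _ pvR3 hok)
          · rw [if_neg h4]
            by_cases h5 : (["advanced_search", "conversation", "full_text"].any (fun x => PySem.Str.isIn x s)) = true
            · rw [if_pos h5, pvAlt_at s 5 (pvBest_eq s 5 (by omega) (pvOk_of_any s 5 _ pvC5 h5) ?_)]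
              · decide
              · intro d hd0 hdc hok
                interval_cases d
                · exact h0 (pvAny_of_Ok s 0 _ pvR0 hok)
                · exact h1 (pvAny_of_Ok s 1 _ pvR1 hok)
                · exact h2 (pvAny_of_Ok s 2 _ pvR2 hok)
                · exact h3 (pvAny_of_Ok s 3 _ pvR3 hok)
                · exact h4 (pvAny_of_Ok s 4 _ pvR4 hok)
            · rw [if_neg h5]
              by_cases h6 : (["folder", "rename", "move_folder", "list_folders"].any (fun x => PySem.Str.isIn x s)) = true
              · rw [if_pos h6, pvAlt_at s 6 (pvBest_eq s 6 (by omega) (pvOk_of_any s 6 _ pvC6 h6) ?_)]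
                · decide
                · intro d hd0 hdc hok
                  interval_cases d
                  · exact h0 (pvAny_of_Ok s 0 _ pvR0 hok)
                  · exact h1 (pvAny_of_Ok s 1 _ pvR1 hok)
                  · exact h2 (pvAny_of_Ok s 2 _ pvR2 hok)
                  · exact h3 (pvAny_of_Ok s 3 _ pvR3 hok)
                  · exact h4 (pvAny_of_Ok s 4 _ pvR4 hok)
                  · exact h5 (pvAny_of_Ok s 5 _ pvR5 hok)
              · rw [if_neg h6]
                by_cases h7 : (["oof", "out_of_office"].any (fun x => PySem.Str.isIn x s)) = true
                · rw [if_pos h7, pvAlt_at s 7 (pvBest_eq s 7 (by omega) (pvOk_of_any s 7 _ pvC7 h7) ?_)]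
                  · decide
                  · intro d hd0 hdc hok
                    interval_cases d
                    · exact h0 (pvAny_of_Ok s 0 _ pvR0 hok)
                    · exact h1 (pvAny_of_Ok s 1 _ pvR1 hok)
                    · exact h2 (pvAny_of_Ok s 2 _ pvR2 hok)
                    · exact h3 (pvAny_of_Ok s 3 _ pvR3 hok)
                    · exact h4 (pvAny_of_Ok s 4 _ pvR4 hok)
                    · exact h5 (pvAny_of_Ok s 5 _ pvR5 hok)
                    · exact h6 (pvAny_of_Ok s 6 _ pvR6 hok)
                · rw [if_neg h7]
                  rw [pvAlt_at s 8 (pvBest_none s ?_)]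
                  · decide
                  · intro d hok
                    obtain ⟨hb0, hb7⟩ := pvOk_bounds s d hok
                    interval_cases d
                    · exact h0 (pvAny_of_Ok s 0 _ pvR0 hok)
                    · exact h1 (pvAny_of_Ok s 1 _ pvR1 hok)
                    · exact h2 (pvAny_of_Ok s 2 _ pvR2 hok)
                    · exact h3 (pvAny_of_Ok s 3 _ pvR3 hok)
                    · exact h4 (pvAny_of_Ok s 4 _ pvR4 hok)
                    · exact h5 (pvAny_of_Ok s 5 _ pvR5 hok)
                    · exact h6 (pvAny_of_Ok s 6 _ pvR6 hok)
                    · exact h7 (pvAny_of_Ok s 7 _ pvR7 hok)
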